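-- pv_equiv track=rewrite | github.com/seon-2/coding_test_log | 백준/Silver/1417. 국회의원 선거/국회의원 선거.py | min_bribes_to_win
-- ===== SOURCE A (Python) =====
-- def min_bribes_to_win(n, votes):
--     # 다솜이의 현재 득표수
--     dasom_votes = votes[0]
--     # 다른 후보들의 득표수 리스트
--     other_votes = votes[1:]
--
--     # 매수한 사람의 수
--     bribes = 0
--
--     # 다솜이가 최대 득표자가 될 때까지 반복
--     while other_votes and dasom_votes <= max(other_votes):
--         # 가장 득표수가 많은 후보의 표를 하나 매수
--         max_votes = max(other_votes)
--         max_index = other_votes.index(max_votes)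
--
--         # 매수하여 다솜이에게 추가
--         other_votes[max_index] -= 1
--         dasom_votes += 1
--         bribes += 1
--
--     return bribes
-- ===== SOURCE B (Python) =====
-- def min_bribes_to_win(n, votes):
--     # Binary search for the least number of bribes t such that t steals,
--     # taken greedily from the tallest rivals, leave every rival below votes[0]+t.
--     d = votes[0]
--     others = votes[1:]
--
--     def enough(t):
--         # t steals suffice iff the total excess above d+t-1 is at most t
--         return sum(max(0, v - (d + t - 1)) for v in others) <= t
--
--     lo = 0
--     hi = sum(max(0, v - (d - 1)) for v in others)  # always enough
--     while lo < hi: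
--         mid = (lo + hi) // 2
--         if enough(mid):
--             hi = mid
--         else:
--             lo = mid + 1
--     return lo
-- ===== Notes on version B (the rewrite author's own statement) =====
-- stated objective: faster
-- what changed: Replaces A's steal-one-vote-at-a-time simulation (rescanning the rival list for its max on every step) with a binary search for the least t such that the total excess of rivals above votes[0]+t-1 is at most t, which characterises the greedy answer.
import Mathlib
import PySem

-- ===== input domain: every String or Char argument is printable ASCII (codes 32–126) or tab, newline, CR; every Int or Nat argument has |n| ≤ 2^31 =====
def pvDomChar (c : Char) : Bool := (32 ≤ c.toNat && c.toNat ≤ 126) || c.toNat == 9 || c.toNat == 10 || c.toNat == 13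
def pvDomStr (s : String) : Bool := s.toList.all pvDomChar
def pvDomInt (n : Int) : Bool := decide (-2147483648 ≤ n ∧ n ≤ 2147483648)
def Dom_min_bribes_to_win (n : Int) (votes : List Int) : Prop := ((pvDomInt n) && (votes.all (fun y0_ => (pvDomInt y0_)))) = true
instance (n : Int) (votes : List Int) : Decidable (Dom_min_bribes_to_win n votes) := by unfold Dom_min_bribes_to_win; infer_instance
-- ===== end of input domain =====

-- B replaces A's one-vote-at-a-time greedy simulation by a binary search for the least
-- sufficient number of bribes; proved equal wherever Python A returns (votes ≠ []).

-- ===== PORT A =====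
-- A's while loop: while other_votes and dasom <= max(other_votes): decrement the first
-- maximal rival, dasom += 1, bribes += 1.  max(xs) = PySem.List.max? xs id (first maximum),
-- .index = PySem.List.index? (a Nat index, always in range here, so List.set/getD are exact).
def pvLoopA (d : Int) (others : List Int) (bribes : Int) : Int :=
  match hm : PySem.List.max? others (fun y => y) with
  | none => bribes                      -- other_votes empty: loop guard false
  | some m =>
    if hd : d ≤ m then
      let i := (PySem.List.index? others m).getD 0
      pvLoopA (d + 1) (others.set i (others.getD i 0 - 1)) (bribes + 1)
    else bribes
termination_by ((PySem.List.max? others (fun y => y)).elim 0 (fun m => (m - d + 1).toNat))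
decreasing_by
  have hmem : m ∈ others := PySem.List.max?_mem hm
  rcases hidx : PySem.List.index? others m with _ | k
  · exact absurd ((PySem.List.index?_eq_none_iff _ _).mp hidx) (not_not_intro hmem)
  obtain ⟨hk, hget, -⟩ := PySem.List.getElem_of_index?_eq_some hidx
  simp only [Option.getD_some]
  have hgd : others.getD k 0 = m := by rw [List.getD_eq_getElem _ _ hk, hget]
  rw [hgd]
  rcases hm' : PySem.List.max? (others.set k (m - 1)) (fun y => y) with _ | m'
  · simp only [hm, Option.elim]; omega
  · have hmem' := PySem.List.max?_mem hm'
    have hle : m' ≤ m := by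
      rcases List.mem_or_eq_of_mem_set hmem' with h | h
      · exact PySem.List.max?_isMax hm _ h
      · omega
    simp only [hm, Option.elim]
    omega

def min_bribes_to_win (n : Int) (votes : List Int) : Int :=
  match PySem.List.pyGet? votes 0 with
  | none => 0                           -- votes = []: Python raises IndexError, excluded by Pre_
  | some d => pvLoopA d (PySem.List.slice votes (some 1) none) 0

-- ===== PORT B =====
-- Source B: enough(t) := sum(max(0, v - (d+t-1)) for v in others) <= t; binary search the least t.
def pvExcess (others : List Int) (c : Int) : Int :=
  (others.map (fun v => max 0 (v - c))).sum

def pvEnough (d : Int) (others : List Int) (t : Int) : Bool :=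
  pvExcess others (d + t - 1) ≤ t

def pvBS (d : Int) (others : List Int) (lo hi : Int) : Int :=
  if h : lo < hi then
    let mid := PySem.Int.floordiv (lo + hi) 2
    if pvEnough d others mid then pvBS d others lo mid else pvBS d others (mid + 1) hi
  else lo
termination_by (hi - lo).toNat
decreasing_by
  · have := PySem.Int.floordiv_two_mid_bounds (le_of_lt h)
    have hlt : PySem.Int.floordiv (lo + hi) 2 < hi :=
      (PySem.Int.floordiv_lt_iff_lt_mul (by omega)).mpr (by omega)
    omega
  · have := PySem.Int.floordiv_two_mid_bounds (le_of_lt h)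
    omega

def min_bribes_to_win_alt (n : Int) (votes : List Int) : Int :=
  match PySem.List.pyGet? votes 0 with
  | none => 0                           -- votes = []: Python raises IndexError, excluded by Pre_
  | some d =>
    let others := PySem.List.slice votes (some 1) none
    pvBS d others 0 (pvExcess others (d - 1))

-- ===== PRECONDITION & SPEC =====
-- Pre_ excludes only votes = [], on which Python A (votes[0]) raises IndexError.
def Pre_min_bribes_to_win (n : Int) (votes : List Int) : Prop := votes ≠ []
instance (n : Int) (votes : List Int) : Decidable (Pre_min_bribes_to_win n votes) := by
  unfold Pre_min_bribes_to_win; infer_instance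
def pvWitness_min_bribes_to_win : Int × List Int := (3, [2, 5, 4])

def Spec_min_bribes_to_win (n : Int) (votes : List Int) (out : Int) : Prop := out = min_bribes_to_win_alt n votes
instance (n : Int) (votes : List Int) (out : Int) : Decidable (Spec_min_bribes_to_win n votes out) := by unfold Spec_min_bribes_to_win; infer_instance

-- ===== CLAIM (what is proved, stated in full; the proofs are below) =====
def Claim_equal_min_bribes_to_win : Prop := ∀ (n : Int) (votes : List Int), Dom_min_bribes_to_win n votes → Pre_min_bribes_to_win n votes → Spec_min_bribes_to_win n votes (min_bribes_to_win n votes)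

-- ===== LEMMAS AND PROOFS =====

-- r is "the least sufficient bribe count" for (d, others)
def pvIsLeast (d : Int) (others : List Int) (r : Int) : Prop :=
  0 ≤ r ∧ pvEnough d others r = true ∧ ∀ t, 0 ≤ t → t < r → pvEnough d others t = false

lemma pvExcess_nonneg (xs : List Int) (c : Int) : 0 ≤ pvExcess xs c :=
  List.sum_nonneg (by intro x hx; simp only [List.mem_map] at hx; obtain ⟨v, _, rfl⟩ := hx; exact le_max_left _ _)

lemma pvExcess_anti (xs : List Int) {c c' : Int} (h : c ≤ c') : pvExcess xs c' ≤ pvExcess xs c :=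
  List.sum_le_sum (by intro v _; simp only [sup_le_iff, le_max_iff]; omega)

lemma pvExcess_zero (xs : List Int) (c : Int) (h : ∀ x ∈ xs, x ≤ c) : pvExcess xs c = 0 := by
  apply List.sum_eq_zero
  intro x hx
  simp only [List.mem_map] at hx
  obtain ⟨v, hv, rfl⟩ := hx
  have := h v hv
  omega

lemma pvExcess_mem_le {xs : List Int} {m : Int} (hm : m ∈ xs) (c : Int) :
    max 0 (m - c) ≤ pvExcess xs c :=
  List.single_le_sum
    (by intro x hx; simp only [List.mem_map] at hx; obtain ⟨v, _, rfl⟩ := hx; exact le_max_left _ _)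
    _ (List.mem_map_of_mem hm)

lemma pvEnough_mono (d : Int) (xs : List Int) {t t' : Int} (h : t ≤ t')
    (ht : pvEnough d xs t = true) : pvEnough d xs t' = true := by
  simp only [pvEnough, decide_eq_true_eq] at *
  have := pvExcess_anti xs (c := d + t - 1) (c' := d + t' - 1) (by omega)
  omega

lemma pvExcess_set (xs : List Int) (i : Nat) (c : Int) (hi : i < xs.length) :
    pvExcess (xs.set i (xs[i] - 1)) c = pvExcess xs c - (if c < xs[i] then 1 else 0) := by
  induction xs generalizing i with
  | nil => simp at hi
  | cons x xs ih =>
    cases i with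
    | zero => simp [pvExcess]; omega
    | succ j =>
      simp only [List.set_cons_succ, List.getElem_cons_succ]
      have := ih j (by simpa using hi)
      simp only [pvExcess, List.map_cons, List.sum_cons] at *
      omega

-- the step lemma: one greedy steal shifts the least-sufficient count by exactly one
lemma pvEnough_step (d : Int) (xs : List Int) {m : Int} {i : Nat}
    (hi : i < xs.length) (hxi : xs[i] = m) (hmax : ∀ x ∈ xs, x ≤ m) {t : Int} (ht : 1 ≤ t) :
    pvEnough d xs t = pvEnough (d + 1) (xs.set i (xs[i] - 1)) (t - 1) := by
  have hset := pvExcess_set xs i (d + t - 1) hi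
  rw [hxi] at hset
  simp only [pvEnough, show d + 1 + (t - 1) - 1 = d + t - 1 by ring, hxi]
  by_cases hc : d + t - 1 < m
  · rw [if_pos hc] at hset
    simp only [decide_eq_decide]
    omega
  · have h0 : pvExcess xs (d + t - 1) = 0 :=
      pvExcess_zero _ _ (fun x hx => by have := hmax x hx; omega)
    rw [if_neg hc] at hset
    simp only [decide_eq_decide]
    omega

lemma pvLoopA_isLeast (d : Int) (others : List Int) (b : Int) :
    ∃ r, pvLoopA d others b = b + r ∧ pvIsLeast d others r := by
  fun_induction pvLoopA d others b with
  | case1 d others b hm =>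
    refine ⟨0, by omega, le_refl 0, ?_, by omega⟩
    have : others = [] := (PySem.List.max?_eq_none_iff _ _).mp hm
    simp [this, pvEnough, pvExcess]
  | case2 d others b m hm hd i ih =>
    -- i is in range and points at the (first) maximum m
    have hmem : m ∈ others := PySem.List.max?_mem hm
    rcases hidx : PySem.List.index? others m with _ | k
    · exact absurd ((PySem.List.index?_eq_none_iff _ _).mp hidx) (not_not_intro hmem)
    obtain ⟨hk, hget, -⟩ := PySem.List.getElem_of_index?_eq_some hidx
    have hieq : i = k := by show (PySem.List.index? others m).getD 0 = k; rw [hidx]; rfl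
    have hgd : others.getD k 0 = m := by rw [List.getD_eq_getElem _ _ hk, hget]
    rw [hieq, hgd] at ih
    obtain ⟨r', heq, hr0, hok, hmin⟩ := ih
    have hmax : ∀ x ∈ others, x ≤ m := fun x hx => PySem.List.max?_isMax hm x hx
    refine ⟨r' + 1, by rw [hieq, hgd, heq]; ring, by omega, ?_, ?_⟩
    · have hstep := pvEnough_step d others hk hget hmax (t := r' + 1) (by omega)
      rw [hget] at hstep
      rw [hstep]
      simpa using hok
    · intro t ht0 htlt
      by_cases ht1 : t = 0
      · subst ht1
        have h1 : (1 : Int) ≤ max 0 (m - (d + 0 - 1)) := le_max_of_le_right (by omega)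
        have h2 := pvExcess_mem_le hmem (d + 0 - 1)
        simp only [pvEnough, Bool.eq_false_iff, ne_eq, decide_eq_true_eq]
        omega
      · have hstep := pvEnough_step d others hk hget hmax (t := t) (by omega)
        rw [hget] at hstep
        rw [hstep]
        exact hmin (t - 1) (by omega) (by omega)
  | case3 d others b m hm hd =>
    refine ⟨0, by omega, le_refl 0, ?_, by omega⟩
    have h0 : pvExcess others (d - 1) = 0 :=
      pvExcess_zero _ _ (fun x hx => by have := PySem.List.max?_isMax hm x hx; omega)
    simp [pvEnough, h0]

lemma pvBS_isLeast (d : Int) (xs : List Int) (lo hi : Int) :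
    0 ≤ lo → lo ≤ hi → pvEnough d xs hi = true →
    (∀ t, 0 ≤ t → t < lo → pvEnough d xs t = false) →
    pvIsLeast d xs (pvBS d xs lo hi) := by
  fun_induction pvBS d xs lo hi with
  | case1 lo hi h mid hok ih =>
    intro hlo hle hhi hbelow
    have hb := PySem.Int.floordiv_two_mid_bounds (le_of_lt h)
    exact ih hlo hb.1 hok hbelow
  | case2 lo hi h mid hok ih =>
    intro hlo hle hhi hbelow
    have hb := PySem.Int.floordiv_two_mid_bounds (le_of_lt h)
    have hlt : PySem.Int.floordiv (lo + hi) 2 < hi :=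
      (PySem.Int.floordiv_lt_iff_lt_mul (by omega)).mpr (by omega)
    refine ih (by omega) (by omega) hhi ?_
    intro t ht0 htlt
    by_cases hcase : t < lo
    · exact hbelow t ht0 hcase
    · -- lo ≤ t ≤ mid : if enough t then enough mid by monotonicity, contradiction
      rcases hb' : pvEnough d xs t with _ | _
      · rfl
      · exact absurd (pvEnough_mono d xs (t := t) (t' := mid) (by omega) hb') (by simp [hok])
  | case3 lo hi h =>
    intro hlo hle hhi hbelow
    have : lo = hi := by omega
    exact ⟨hlo, this ▸ hhi, hbelow⟩

lemma pvIsLeast_unique {d : Int} {xs : List Int} {r1 r2 : Int}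
    (h1 : pvIsLeast d xs r1) (h2 : pvIsLeast d xs r2) : r1 = r2 := by
  obtain ⟨h10, h1ok, h1min⟩ := h1
  obtain ⟨h20, h2ok, h2min⟩ := h2
  rcases lt_trichotomy r1 r2 with h | h | h
  · exact absurd h1ok (by simp [h2min r1 h10 h])
  · exact h
  · exact absurd h2ok (by simp [h1min r2 h20 h])

-- ===== VERDICT (by name: the statement is the Claim_ definition above) =====
theorem min_bribes_to_win_spec : Claim_equal_min_bribes_to_win := by
  intro n votes _ hpre
  unfold Spec_min_bribes_to_win min_bribes_to_win min_bribes_to_win_alt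
  rcases votes with _ | ⟨v0, rest⟩
  · exact absurd rfl hpre
  · rw [PySem.List.pyGet?_zero_cons]
    simp only
    obtain ⟨r, heq, hleast⟩ := pvLoopA_isLeast v0 (PySem.List.slice (v0 :: rest) (some 1) none) 0
    have hbs := pvBS_isLeast v0 (PySem.List.slice (v0 :: rest) (some 1) none) 0
      (pvExcess (PySem.List.slice (v0 :: rest) (some 1) none) (v0 - 1))
      (le_refl 0) (pvExcess_nonneg _ _)
      (by
        simp only [pvEnough, decide_eq_true_eq]
        have := pvExcess_anti (PySem.List.slice (v0 :: rest) (some 1) none)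
          (c := v0 - 1) (c' := v0 + pvExcess (PySem.List.slice (v0 :: rest) (some 1) none) (v0 - 1) - 1)
          (by have := pvExcess_nonneg (PySem.List.slice (v0 :: rest) (some 1) none) (v0 - 1); omega)
        omega)
      (by intro t h1 h2; omega)
    rw [heq]
    have := pvIsLeast_unique hleast hbs
    omega
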